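-- pv_equiv track=rewrite | github.com/gasparin52/AyED1-2024-TPs | tp1/ejercicio9.py | llenar_camiones
-- ===== SOURCE A (Python) =====
-- def llenar_camiones(peso_cajon):
--     cantidad_camiones = 0
--     for cajon in peso_cajon:
--         peso_camion = 0
--         while peso_camion < 500000:
--             peso_camion += cajon
--             if peso_camion > 500000 * 0.8:
--                 cantidad_camiones += 1
--                 break
--     return cantidad_camiones
-- ===== SOURCE B (Python) =====
-- def llenar_camiones(peso_cajon):
--     # Every positive crate weight eventually pushes the truck load past the
--     # 80% threshold, so each crate fills exactly one truck.
--     return len(peso_cajon)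
-- ===== Notes on version B (the rewrite author's own statement) =====
-- stated objective: simpler
-- what changed: Replaced the per-crate while-loop that repeatedly loads one crate until the 400000 threshold is crossed by the closed form len(peso_cajon), since every positive crate yields exactly one truck.
import Mathlib
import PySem

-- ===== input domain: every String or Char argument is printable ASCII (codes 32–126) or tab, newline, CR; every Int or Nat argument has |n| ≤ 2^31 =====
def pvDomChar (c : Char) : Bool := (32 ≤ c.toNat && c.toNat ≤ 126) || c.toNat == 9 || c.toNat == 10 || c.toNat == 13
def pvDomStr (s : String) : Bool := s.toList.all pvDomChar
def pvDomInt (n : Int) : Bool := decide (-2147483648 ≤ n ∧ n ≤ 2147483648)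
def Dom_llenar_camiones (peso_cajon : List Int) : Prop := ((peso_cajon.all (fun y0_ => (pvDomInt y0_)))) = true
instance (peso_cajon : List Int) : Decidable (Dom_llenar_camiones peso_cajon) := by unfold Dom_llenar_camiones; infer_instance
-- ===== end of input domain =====

-- B replaces A's threshold-chasing inner while-loop by the closed form len(peso_cajon) (simpler).
-- ===== PORT A =====
-- inner 'while peso_camion < 500000' loop; fuel makes it total (500001 iterations
-- suffice for every positive cajon; for cajon <= 0 the Python loops forever, outside Pre_).
-- 500000 * 0.8 == 400000.0 exactly, and the int comparison 'peso_camion > 400000.0' is exact here.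
def pvInnerA (cajon : Int) : Nat → Int → Int
  | 0, _ => 0
  | fuel + 1, peso_camion =>
    if peso_camion < 500000 then
      let p := peso_camion + cajon
      if p > 400000 then 1 else pvInnerA cajon fuel p
    else 0

def llenar_camiones (peso_cajon : List Int) : Int :=
  peso_cajon.foldl (fun cantidad_camiones cajon => cantidad_camiones + pvInnerA cajon 500001 0) 0

-- ===== PORT B =====
def llenar_camiones_alt (peso_cajon : List Int) : Int := (peso_cajon.length : Int)

-- ===== PRECONDITION & SPEC =====
-- Pre_ excludes lists containing a non-positive weight: there A's inner while-loop never
-- terminates (the Python diverges), so A returns no value at all.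
def Pre_llenar_camiones (peso_cajon : List Int) : Prop := ∀ c ∈ peso_cajon, 0 < c
instance (peso_cajon : List Int) : Decidable (Pre_llenar_camiones peso_cajon) := by unfold Pre_llenar_camiones; infer_instance
def pvWitness_llenar_camiones : List Int := [1, 400000, 123456]

def Spec_llenar_camiones (peso_cajon : List Int) (out : Int) : Prop := out = llenar_camiones_alt peso_cajon
instance (peso_cajon : List Int) (out : Int) : Decidable (Spec_llenar_camiones peso_cajon out) := by unfold Spec_llenar_camiones; infer_instance

-- ===== CLAIM (what is proved, stated in full; the proofs are below) =====
def Claim_equal_llenar_camiones : Prop := ∀ (peso_cajon : List Int), Dom_llenar_camiones peso_cajon → Pre_llenar_camiones peso_cajon → Spec_llenar_camiones peso_cajon (llenar_camiones peso_cajon)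

-- ===== LEMMAS AND PROOFS =====
-- for a positive crate the inner loop always ends with exactly one truck filled
theorem pvInnerA_pos (cajon : Int) (hc : 1 ≤ cajon) :
    ∀ (fuel : Nat) (p : Int), p ≤ 400000 → 400000 < p + fuel * cajon →
      pvInnerA cajon fuel p = 1 := by
  intro fuel
  induction fuel with
  | zero => intro p hp hbig; simp at hbig; omega
  | succ f ih =>
    intro p hp hbig
    have hlt : p < 500000 := by omega
    simp only [pvInnerA, if_pos hlt]
    by_cases h : p + cajon > 400000
    · simp [h]
    · simp only [if_neg h]
      apply ih
      · omega
      · have : ((f : Int) + 1) * cajon = (f : Int) * cajon + cajon := by ring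
        push_cast at hbig ⊢
        linarith

theorem pvFoldl_len (l : List Int) (hpos : ∀ c ∈ l, 0 < c) :
    ∀ acc : Int,
      l.foldl (fun cantidad_camiones cajon => cantidad_camiones + pvInnerA cajon 500001 0) acc
        = acc + (l.length : Int) := by
  induction l with
  | nil => intro acc; simp
  | cons c t ih =>
    intro acc
    have hc : 1 ≤ c := hpos c (List.mem_cons_self ..)
    have hone : pvInnerA c 500001 0 = 1 := by
      apply pvInnerA_pos c hc
      · norm_num
      · have : (500001 : Int) * 1 ≤ (500001 : Int) * c := by
          exact mul_le_mul_of_nonneg_left hc (by norm_num)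
        push_cast
        linarith
    simp only [List.foldl_cons, hone]
    rw [ih (fun x hx => hpos x (List.mem_cons_of_mem _ hx))]
    simp [List.length_cons]
    push_cast
    omega

-- ===== VERDICT (by name: the statement is the Claim_ definition above) =====
theorem llenar_camiones_spec : Claim_equal_llenar_camiones := by
  intro l _ hpre
  unfold Spec_llenar_camiones llenar_camiones llenar_camiones_alt
  rw [pvFoldl_len l hpre 0]
  simp
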